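-- pv_equiv track=rewrite | github.com/SAlimdjanov/MIT-Introduction-to-Algorithms-4th-Ed | 1 - Foundations/1.6 - Probabilistic Analysis and Randomized Algorithms/Code/hiring_problem.py | hire_assistant
-- ===== SOURCE A (Python) =====
-- def hire_assistant(candidates, n):
--     """Hire assistant procedure
--
--     Time complexity: O(n)
--     Space complexity: O(n)
--
--     Args:
--         candidates (list[int]): List of the qualification level of each candidate
--         n (int): Number of candidates
--
--     Returns:
--         list[int]: Indices of list 'candidate' that were hired
--     """
--     best = 0
--     hired_candidates = []
--
--     for i in range(0, n):
--         if candidates[i] > best: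
--             best = candidates[i]
--             hired_candidates.append(i)
--
--     return hired_candidates
-- ===== SOURCE B (Python) =====
-- def hire_assistant(candidates, n):
--     """Prefix-maximum table + comprehension re-implementation."""
--     prefix = [0]
--     for i in range(1, n):
--         p = prefix[-1]
--         c = candidates[i - 1]
--         prefix.append(p if p > c else c)
--     return [i for i in range(n) if candidates[i] > prefix[i]]
-- ===== Notes on version B (the rewrite author's own statement) =====
-- stated objective: alternative
-- what changed: Replaces the single mutable best/append loop by a two-pass scheme: first build a running-maximum prefix table, then a comprehension collects exactly the indices whose value strictly exceeds the prefix maximum before them.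
import Mathlib
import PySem

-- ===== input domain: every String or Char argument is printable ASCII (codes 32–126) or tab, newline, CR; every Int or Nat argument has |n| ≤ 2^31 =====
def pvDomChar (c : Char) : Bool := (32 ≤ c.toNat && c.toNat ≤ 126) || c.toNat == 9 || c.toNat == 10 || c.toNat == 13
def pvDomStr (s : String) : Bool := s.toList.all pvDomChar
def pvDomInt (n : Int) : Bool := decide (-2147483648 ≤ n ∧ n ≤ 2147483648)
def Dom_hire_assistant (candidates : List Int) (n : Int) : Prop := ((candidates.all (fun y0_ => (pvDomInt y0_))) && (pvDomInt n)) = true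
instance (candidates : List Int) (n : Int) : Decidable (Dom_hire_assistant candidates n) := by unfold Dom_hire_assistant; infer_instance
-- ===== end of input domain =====

-- B replaces A's one-pass best/append loop by a prefix-maximum table plus a filtering pass (alternative structure, same cost).

-- ===== PORT A =====
-- best = 0; for i in range(0, n): if candidates[i] > best: best = candidates[i]; hired.append(i)
-- candidates[i] is always in range under Pre_, so pyGetD with default 0 is exact there.
def hire_assistant (candidates : List Int) (n : Int) : List Int :=
  ((PySem.List.pyRange 0 n 1).foldl
    (fun st i =>
      let c := PySem.List.pyGetD candidates i 0
      if c > st.1 then (c, st.2 ++ [i]) else st)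
    ((0 : Int), ([] : List Int))).2

-- ===== PORT B =====
-- prefix = [0]; for i in range(1, n): prefix.append(prefix[-1] if prefix[-1] > candidates[i-1] else candidates[i-1]);
-- return [i for i in range(n) if candidates[i] > prefix[i]].  All indexing is in range under Pre_, so pyGetD/getD are exact.
def hire_assistant_alt (candidates : List Int) (n : Int) : List Int :=
  let pfx := (PySem.List.pyRange 1 n 1).foldl
    (fun p i =>
      let last := p.getLast?.getD 0
      let c := PySem.List.pyGetD candidates (i - 1) 0
      p ++ [if last > c then last else c])
    [(0 : Int)]
  (PySem.List.pyRange 0 n 1).filter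
    (fun i => PySem.List.pyGetD candidates i 0 > PySem.List.pyGetD pfx i 0)

-- ===== PRECONDITION & SPEC =====
-- Pre_ excludes exactly the inputs where Python A raises IndexError: n > len(candidates).
def Pre_hire_assistant (candidates : List Int) (n : Int) : Prop := n ≤ (candidates.length : Int)
instance (candidates : List Int) (n : Int) : Decidable (Pre_hire_assistant candidates n) := by unfold Pre_hire_assistant; infer_instance
def pvWitness_hire_assistant : List Int × Int := ([3, 1, 4, 1, 5], 5)

def Spec_hire_assistant (candidates : List Int) (n : Int) (out : List Int) : Prop := out = hire_assistant_alt candidates n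
instance (candidates : List Int) (n : Int) (out : List Int) : Decidable (Spec_hire_assistant candidates n out) := by unfold Spec_hire_assistant; infer_instance

-- ===== CLAIM (what is proved, stated in full; the proofs are below) =====
def Claim_equal_hire_assistant : Prop := ∀ (candidates : List Int) (n : Int), Dom_hire_assistant candidates n → Pre_hire_assistant candidates n → Spec_hire_assistant candidates n (hire_assistant candidates n)

-- ===== LEMMAS AND PROOFS =====

-- running maximum of the first k candidates, floored at 0 (A's 'best' after k iterations, B's prefix[k])
def pmax (c : List Int) (k : Nat) : Int := (c.take k).foldl max 0

theorem pmax_succ (c : List Int) (k : Nat) (h : k < c.length) :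
    pmax c (k + 1) = max (pmax c k) (c.getD k 0) := by
  unfold pmax
  rw [List.take_add_one, List.getElem?_eq_getElem h]
  rw [Option.toList_some, List.foldl_append]
  simp [List.getD_eq_getElem?_getD, List.getElem?_eq_getElem h]

-- A's loop: first component is the running maximum, second the filtered index list
theorem lemA (c : List Int) (m : Nat) (h : m ≤ c.length) :
    (PySem.List.pyRange 0 (m : Int) 1).foldl
      (fun st i =>
        let cv := PySem.List.pyGetD c i 0
        if cv > st.1 then (cv, st.2 ++ [i]) else st)
      ((0 : Int), ([] : List Int))
    = (pmax c m,
       (PySem.List.pyRange 0 (m : Int) 1).filter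
         (fun i => PySem.List.pyGetD c i 0 > pmax c i.toNat)) := by
  induction m with
  | zero => simp [PySem.List.pyRange_one_eq_nil, pmax]
  | succ k ih =>
    have hk : k < c.length := h
    have hcast : ((k + 1 : Nat) : Int) = (k : Int) + 1 := by push_cast; ring
    rw [hcast, PySem.List.pyRange_one_succ_right (by positivity),
        List.foldl_append, List.filter_append, ih (le_of_lt hk)]
    have hget : PySem.List.pyGetD c (k : Int) 0 = c.getD k 0 := by
      simp [PySem.List.pyGetD_natCast]
    have hpm : pmax c (k + 1) = max (pmax c k) (c.getD k 0) := pmax_succ c k hk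
    simp only [List.foldl_cons, List.foldl_nil, List.filter_cons, List.filter_nil, hget,
      Int.toNat_natCast, hpm]
    by_cases hgt : c.getD k 0 > pmax c k
    · rw [List.getD_eq_getElem?_getD] at hgt
      simp [hgt, max_eq_right (le_of_lt hgt)]
    · rw [List.getD_eq_getElem?_getD] at hgt
      simp [hgt, max_eq_left (le_of_not_gt hgt)]

theorem getLast_map_range_pmax (c : List Int) (k : Nat) (hk : 1 ≤ k) :
    ((List.range k).map (pmax c)).getLast?.getD 0 = pmax c (k - 1) := by
  obtain ⟨j, rfl⟩ : ∃ j, k = j + 1 := ⟨k - 1, by omega⟩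
  simp [List.range_succ, List.map_append]

-- B's first loop: the prefix table is the list [pmax c 0, …, pmax c (max m 1 - 1)]
theorem lemB (c : List Int) (m : Nat) (h : m ≤ c.length) :
    (PySem.List.pyRange 1 (m : Int) 1).foldl
      (fun p i =>
        let last := p.getLast?.getD 0
        let cv := PySem.List.pyGetD c (i - 1) 0
        p ++ [if last > cv then last else cv])
      [(0 : Int)]
    = (List.range (max m 1)).map (pmax c) := by
  induction m with
  | zero => simp [PySem.List.pyRange_one_eq_nil, pmax]
  | succ k ih =>
    by_cases hk0 : k = 0
    · subst hk0
      simp [PySem.List.pyRange_one_eq_nil, pmax]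
    · have hk1 : 1 ≤ k := Nat.one_le_iff_ne_zero.mpr hk0
      have hklt : k - 1 < c.length := by omega
      have hcast : ((k + 1 : Nat) : Int) = (k : Int) + 1 := by push_cast; ring
      rw [hcast, PySem.List.pyRange_one_succ_right (by exact_mod_cast hk1),
          List.foldl_append, ih (by omega)]
      have hget : PySem.List.pyGetD c ((k : Int) - 1) 0 = c.getD (k - 1) 0 := by
        have h1 : ((k : Int) - 1) = ((k - 1 : Nat) : Int) := by omega
        rw [h1]
        simp [PySem.List.pyGetD_natCast]
      have hmaxk : max k 1 = k := by omega
      have hlast := getLast_map_range_pmax c k hk1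
      have hpm : pmax c k = max (pmax c (k - 1)) (c.getD (k - 1) 0) := by
        have := pmax_succ c (k - 1) hklt
        rwa [Nat.sub_add_cancel hk1] at this
      rw [hmaxk]
      simp only [List.foldl_cons, List.foldl_nil, hget, hlast]
      have hmax1 : max (k + 1) 1 = k + 1 := by omega
      rw [hmax1, List.range_succ, List.map_append]
      congr 1
      simp only [List.map_cons, List.map_nil]
      congr 1
      by_cases hgt : pmax c (k - 1) > c.getD (k - 1) 0
      · rw [if_pos hgt, hpm, max_eq_left (le_of_lt hgt)]
      · rw [if_neg hgt, hpm, max_eq_right (le_of_not_gt hgt)]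

theorem pfx_getD (c : List Int) (m : Nat) (k : Nat) (hk : k < m) :
    PySem.List.pyGetD ((List.range (max m 1)).map (pmax c)) ((k : Nat) : Int) 0 = pmax c k := by
  have hkm : k < max m 1 := by omega
  simp [PySem.List.pyGetD_natCast, List.getD_eq_getElem?_getD,
    List.getElem?_map, List.getElem?_range hkm]

-- ===== VERDICT (by name: the statement is the Claim_ definition above) =====
theorem hire_assistant_spec : Claim_equal_hire_assistant := by
  intro candidates n _ hpre
  unfold Pre_hire_assistant at hpre
  unfold Spec_hire_assistant hire_assistant hire_assistant_alt
  by_cases hn : n ≤ 0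
  · rw [PySem.List.pyRange_one_eq_nil hn]
    simp
  · push_neg at hn
    obtain ⟨m, rfl⟩ : ∃ m : Nat, n = (m : Int) := ⟨n.toNat, by omega⟩
    have hm : m ≤ candidates.length := by exact_mod_cast hpre
    rw [lemA candidates m hm]
    simp only []
    rw [lemB candidates m hm]
    apply List.filter_congr
    intro i hi
    rw [PySem.List.mem_pyRange_one] at hi
    obtain ⟨k, rfl⟩ : ∃ k : Nat, i = (k : Int) := ⟨i.toNat, by omega⟩
    have hkm : k < m := by exact_mod_cast hi.2
    rw [pfx_getD candidates m k hkm]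
    simp
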